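-- pv_equiv track=rewrite | github.com/IonutZbir/Universita | Primo Anno/Programmazione/Python/esameING/Esercitazioni/2023_06_15/2021_11_03_AppelloSessioneStraordinaria-Soluzione.py | non_dice_verita
-- ===== SOURCE A (Python) =====
-- def non_dice_verita(input):
--     # costruisco una mappa che associa alle vocali
--     # la loro frequenza (solo se maggiore di 0)
--     frequenze = {}
--     for carattere in input:
--         if carattere in "aeiou":
--             if carattere in frequenze:
--                 frequenze[carattere] += 1
--             else:
--                 frequenze[carattere] = 1
--
--     # costruisco una mappa "inversa" che associa
--     # a ogni livello di frequenza l'insieme dei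
--     # numeri (potenzialmente più di uno) che hanno
--     # quella frequenza
--     caratteri_co_frequenti = dict()
--     for carattere, frequenza in frequenze.items():
--         if frequenza in caratteri_co_frequenti:
--             caratteri_co_frequenti[frequenza].add(carattere)
--         else:
--             caratteri_co_frequenti[frequenza] = set([carattere])  # oppure { carattere }
--
--     # vedo se c'è almeno un livello di frequenza con 2 o più
--     # caratteri associati
--     risultato = False
--     for cofrequenti in caratteri_co_frequenti.values():
--         if len(cofrequenti) >= 2:
--             risultato = True
--
--     # Si poteva ottimizzare nel caso migliore, osservando che non serve
--     # davvero determinare tutti i caratteri con la stessa frequenza,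
--     # potendosi invece limitare a verificare che ce ne sia almeno una coppia
--
--     return risultato
-- ===== SOURCE B (Python) =====
-- def non_dice_verita(input):
--     # count each vowel directly, keep the positive counts,
--     # and answer "is some count repeated?" by comparing with the deduplicated counts
--     counts = [sum(1 for ch in input if ch == v) for v in "aeiou"]
--     vals = [c for c in counts if c > 0]
--     return len(vals) != len(set(vals))
-- ===== Notes on version B (the rewrite author's own statement) =====
-- stated objective: simpler
-- what changed: B counts each of the five vowels directly and answers by checking the positive counts list for a duplicate (len(vals) != len(set(vals))), dropping A's per-character frequency dict, the inverse frequency->set-of-characters map and the bucket-size scan.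
import Mathlib
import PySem

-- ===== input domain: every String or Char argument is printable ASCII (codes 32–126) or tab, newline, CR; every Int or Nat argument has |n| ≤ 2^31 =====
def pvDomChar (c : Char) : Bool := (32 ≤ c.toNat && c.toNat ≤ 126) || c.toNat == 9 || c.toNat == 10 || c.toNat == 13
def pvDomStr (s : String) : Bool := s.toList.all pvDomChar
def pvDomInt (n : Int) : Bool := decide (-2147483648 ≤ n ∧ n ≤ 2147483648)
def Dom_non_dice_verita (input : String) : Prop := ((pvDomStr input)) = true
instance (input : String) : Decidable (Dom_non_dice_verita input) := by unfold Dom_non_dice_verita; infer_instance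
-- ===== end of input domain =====

-- B replaces A's per-character frequency dict + inverse frequency->set-of-characters map + bucket scan
-- by directly counting each of the five vowels and checking the positive counts for a duplicate (simpler).


-- ===== PORT A =====
def non_dice_verita (input : String) : Bool :=
  -- frequenze: vowel -> its frequency, built character by character
  let frequenze : PySem.Dict Char Int :=
    input.toList.foldl (fun d c =>
      if "aeiou".toList.contains c then
        match d.get? c with
        | some n => d.insert c (n + 1)
        | none   => d.insert c 1
      else d) PySem.Dict.empty
  -- caratteri_co_frequenti: frequency level -> set of characters with that frequency
  let caratteri_co_frequenti : PySem.Dict Int (PySem.Set Char) :=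
    frequenze.items.foldl (fun d p =>
      match d.get? p.2 with
      | some s => d.insert p.2 (PySem.Set.add s p.1)
      | none   => d.insert p.2 (PySem.Set.ofList [p.1])) PySem.Dict.empty
  -- risultato: is there a frequency level with 2 or more characters?
  caratteri_co_frequenti.values.foldl (fun r s => if 2 ≤ PySem.Set.len s then true else r) false

-- ===== PORT B =====
def non_dice_verita_alt (input : String) : Bool :=
  let counts : List Int := "aeiou".toList.map (fun v => (input.toList.count v : Int))
  let vals : List Int := counts.filter (fun c => 0 < c)
  decide (vals.length ≠ (PySem.Set.ofList vals).length)

-- ===== PRECONDITION & SPEC =====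
def Spec_non_dice_verita (input : String) (out : Bool) : Prop := out = non_dice_verita_alt input
instance (input : String) (out : Bool) : Decidable (Spec_non_dice_verita input out) := by unfold Spec_non_dice_verita; infer_instance

-- ===== CLAIM (what is proved, stated in full; the proofs are below) =====
def Claim_equal_non_dice_verita : Prop := ∀ (input : String), Dom_non_dice_verita input → Spec_non_dice_verita input (non_dice_verita input)

-- ===== LEMMAS AND PROOFS =====

-- Phase 1 of A builds Counter(vowels of input).
theorem phase1_eq_counter (l : List Char) :
    l.foldl (fun d c =>
      if "aeiou".toList.contains c then
        match d.get? c with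
        | some n => d.insert c (n + 1)
        | none   => d.insert c 1
      else d) (PySem.Dict.empty : PySem.Dict Char Int)
    = PySem.Dict.counter (l.filter (fun c => "aeiou".toList.contains c)) := by
  have hstep : ∀ (d : PySem.Dict Char Int) (c : Char), c ∈ l →
      (if "aeiou".toList.contains c then
        match d.get? c with
        | some n => d.insert c (n + 1)
        | none   => d.insert c 1
      else d)
      = (if "aeiou".toList.contains c then d.insert c (d.getD c 0 + 1) else d) := by
    intro d c _
    by_cases hv : "aeiou".toList.contains c
    · simp only [hv, if_true]
      cases h : d.get? c with
      | some n => simp [PySem.Dict.getD_eq_get?_getD, h]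
      | none => simp [PySem.Dict.getD_eq_get?_getD, h]
    · rw [if_neg hv, if_neg hv]
  refine (PySem.List.foldl_congr_mem _ _ _ _ hstep).trans ?_
  rw [PySem.List.foldl_if_eq_foldl_filter]
  rw [PySem.Dict.foldl_insert_getD_add_one_eq_counter]

-- Phase 2's if/else step is a modify-with-default set-add.
theorem step2_eq_modify (d : PySem.Dict Int (PySem.Set Char)) (p : Char × Int) :
    (match d.get? p.2 with
      | some s => d.insert p.2 (PySem.Set.add s p.1)
      | none   => d.insert p.2 (PySem.Set.ofList [p.1]))
    = d.modify p.2 [] (fun s => PySem.Set.add s p.1) := by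
  cases h : d.get? p.2 with
  | some s => simp [PySem.Dict.modify, PySem.Dict.getD_eq_get?_getD, h]
  | none => simp [PySem.Dict.modify, PySem.Dict.getD_eq_get?_getD, h, PySem.Set.ofList, PySem.Set.add]

-- With pairwise-distinct characters, set-add grouping is list-append grouping.
theorem foldAdd_eq_foldApp : ∀ (L : List (Char × Int)) (d : PySem.Dict Int (PySem.Set Char)),
    (L.map Prod.fst).Nodup → (∀ k c, c ∈ d.getD k [] → c ∉ L.map Prod.fst) →
    L.foldl (fun d p => d.modify p.2 [] (fun s => PySem.Set.add s p.1)) d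
    = L.foldl (fun d p => d.modify p.2 [] (fun s => s ++ [p.1])) d
  | [], _, _, _ => rfl
  | p :: t, d, hnd, hd => by
    simp only [List.foldl_cons]
    have h1 : PySem.Set.add (d.getD p.2 []) p.1 = d.getD p.2 [] ++ [p.1] :=
      PySem.Set.add_of_not_mem (fun hm => hd p.2 p.1 hm (by simp))
    have hmod : d.modify p.2 [] (fun s => PySem.Set.add s p.1) = d.modify p.2 [] (fun s => s ++ [p.1]) := by
      simp [PySem.Dict.modify, h1]
    rw [hmod]
    refine foldAdd_eq_foldApp t _ ?_ ?_
    · exact (List.nodup_cons.mp (by simpa using hnd)).2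
    · intro k c hmem
      rcases eq_or_ne k p.2 with rfl | hk
      · rw [PySem.Dict.getD_modify_self] at hmem
        rcases List.mem_append.mp hmem with h | h
        · exact fun ht => hd _ _ h (by simp [ht])
        · have : c = p.1 := by simpa using h
          subst this
          exact (List.nodup_cons.mp (by simpa using hnd)).1
      · rw [PySem.Dict.getD_modify_of_ne] at hmem
        · exact fun ht => hd _ _ hmem (by simp [ht])
        · exact hk

-- set(l) keeps the length exactly when l has no duplicate.
theorem length_ofList_eq_iff (l : List Int) :
    (PySem.Set.ofList l).length = l.length ↔ l.Nodup := by
  constructor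
  · intro h
    have hperm : (PySem.Set.ofList l).Perm l.dedup := by
      rw [List.perm_ext_iff_of_nodup (PySem.Set.nodup_ofList _) l.nodup_dedup]
      intro a; simp [PySem.Set.mem_ofList, List.mem_dedup]
    have hlen : l.dedup.length = l.length := by rw [← hperm.length_eq, h]
    have : l.dedup = l := l.dedup_sublist.eq_of_length hlen
    exact List.dedup_eq_self.mp this
  · intro h
    rw [PySem.Set.ofList_eq_self_of_nodup _ h]

-- a value occurs twice somewhere iff the list is not duplicate-free
theorem exists_two_le_count_iff (l : List Int) :
    (∃ k ∈ l, 2 ≤ l.count k) ↔ ¬ l.Nodup := by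
  rw [List.nodup_iff_count_le_one]
  constructor
  · rintro ⟨k, _, h2⟩ hall
    have := hall k; omega
  · intro h
    push Not at h
    obtain ⟨k, hk⟩ := h
    exact ⟨k, List.count_pos_iff.mp (by omega), by omega⟩

-- A answers: do the positive vowel frequencies contain a duplicate?
theorem non_dice_verita_eq_dup (input : String) :
    non_dice_verita input
    = decide ¬ (((PySem.Set.ofList (input.toList.filter (fun c => "aeiou".toList.contains c))).map
        (fun k => ((input.toList.filter (fun c => "aeiou".toList.contains c)).count k : Int))).Nodup) := by
  simp only [non_dice_verita]
  rw [phase1_eq_counter, PySem.Dict.items_counter]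
  set vs := input.toList.filter (fun c => "aeiou".toList.contains c) with hvs
  set K : List Char := PySem.Set.ofList vs with hK
  set cnt : Char → Int := fun k => (vs.count k : Int) with hcnt
  set L : List (Char × Int) := K.map (fun k => (k, cnt k)) with hL
  set vals : List Int := K.map cnt with hvals
  have hmapfst : L.map Prod.fst = K := by
    rw [hL, List.map_map]; exact List.map_id K
  have h2 : L.foldl (fun d p =>
      match d.get? p.2 with
      | some s => d.insert p.2 (PySem.Set.add s p.1)
      | none   => d.insert p.2 (PySem.Set.ofList [p.1])) PySem.Dict.empty
      = (L.map Prod.swap).foldl (fun d q => d.modify q.1 [] (fun s => s ++ [q.2])) PySem.Dict.empty := by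
    refine (PySem.List.foldl_congr_mem _ _ _ _ (fun d p _ => step2_eq_modify d p)).trans ?_
    refine (foldAdd_eq_foldApp L _ ?_ ?_).trans ?_
    · rw [hmapfst]; exact PySem.Set.nodup_ofList vs
    · intro k c hm; simp [PySem.Dict.getD_empty] at hm
    · rw [hL, List.map_map]; simp only [List.foldl_map]; rfl
  rw [h2]
  set SW : List (Int × Char) := L.map Prod.swap with hSW
  set D2 : PySem.Dict Int (PySem.Set Char) :=
    SW.foldl (fun d q => d.modify q.1 [] (fun s => s ++ [q.2])) PySem.Dict.empty with hD2
  have hSWfst : SW.map Prod.fst = vals := by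
    rw [hSW, hL, List.map_map, List.map_map]; rfl
  have hnodupK : D2.keys.Nodup := by
    rw [hD2]
    exact PySem.Dict.nodup_keys_foldl_modify_key SW Prod.fst [] (fun _ q => (· ++ [q.2])) _
      PySem.Dict.nodup_keys_empty
  have hkeys : D2.keys = PySem.Set.ofList vals := by
    rw [hD2, PySem.Dict.keys_foldl_modify_key, PySem.Dict.keys_empty, PySem.Set.update_nil_left,
      hSWfst]
  have hgetD : ∀ k, D2.getD k [] = (SW.filter (fun q => q.1 == k)).map (·.2) := by
    intro k
    rw [hD2, PySem.Dict.getD_foldl_modify_append, PySem.Dict.getD_empty]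
    simp
  have hvaluesD : D2.values = D2.keys.map (fun k => D2.getD k []) :=
    PySem.Dict.values_eq_map_keys D2 hnodupK []
  have hif : ∀ (l : List (PySem.Set Char)) (b : Bool),
      l.foldl (fun r s => if 2 ≤ PySem.Set.len s then true else r) b
      = (b || l.any (fun s => decide (2 ≤ PySem.Set.len s))) := by
    intro l b
    refine (PySem.List.foldl_congr_mem _ _
      (fun r s => if (decide (2 ≤ PySem.Set.len s)) then true else r) _
      (fun r s _ => by simp only [decide_eq_true_eq])).trans ?_
    exact PySem.List.foldl_if_true_eq _ l b
  rw [hif, Bool.false_or, hvaluesD, List.any_map, hkeys]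
  have hcount : ∀ k : Int, ((SW.filter (fun q => q.1 == k)).map (·.2)).length = vals.count k := by
    intro k
    rw [List.length_map, ← List.countP_eq_length_filter]
    rw [hSW, hL, List.map_map, hvals]
    rw [List.count, List.countP_map, List.countP_map]
    rfl
  have hpred : ∀ k : Int, (decide (2 ≤ PySem.Set.len (D2.getD k []))) = decide (2 ≤ vals.count k) := by
    intro k
    rw [hgetD k]
    simp only [PySem.Set.len, hcount k, decide_eq_decide]
    omega
  have hany : (PySem.Set.ofList vals).any ((fun s => decide (2 ≤ PySem.Set.len s)) ∘ (fun k => D2.getD k []))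
      = (PySem.Set.ofList vals).any (fun k => decide (2 ≤ vals.count k)) :=
    PySem.List.any_congr_mem (fun k _ => hpred k)
  rw [hany]
  rw [Bool.eq_iff_iff, List.any_eq_true, decide_eq_true_eq]
  simp only [PySem.Set.mem_ofList, decide_eq_true_eq]
  exact exists_two_le_count_iff vals

-- B answers the same question, reading the counts off in the fixed vowel order.
theorem alt_eq_dup (input : String) :
    non_dice_verita_alt input
    = decide ¬ ((("aeiou".toList.filter (fun v => 0 < input.toList.count v)).map
        (fun v => (input.toList.count v : Int))).Nodup) := by
  simp only [non_dice_verita_alt]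
  have hfm : ("aeiou".toList.map (fun v => (input.toList.count v : Int))).filter (fun c => 0 < c)
      = ("aeiou".toList.filter (fun v => 0 < input.toList.count v)).map
          (fun v => (input.toList.count v : Int)) := by
    rw [List.filter_map]
    congr 1
    apply List.filter_congr
    intro v _
    simp only [Function.comp_apply, decide_eq_decide]
    omega
  rw [hfm, decide_eq_decide]
  rw [← length_ofList_eq_iff]
  omega

-- A's value list (first-occurrence order) and B's (vowel order) are permutations of one another.
theorem vals_perm (input : String) :
    ((PySem.Set.ofList (input.toList.filter (fun c => "aeiou".toList.contains c))).map
        (fun k => ((input.toList.filter (fun c => "aeiou".toList.contains c)).count k : Int))).Perm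
     (("aeiou".toList.filter (fun v => 0 < input.toList.count v)).map
        (fun v => (input.toList.count v : Int))) := by
  set vs : List Char := input.toList.filter (fun c => "aeiou".toList.contains c) with hvs
  set K : List Char := PySem.Set.ofList vs with hK
  have h1 : ∀ k ∈ K, ((vs.count k : Int)) = ((input.toList.count k : Int)) := by
    intro k hk
    have hkv : k ∈ vs := (PySem.Set.mem_ofList _ _).mp hk
    have hb : "aeiou".toList.contains k = true := (List.mem_filter.mp (hvs ▸ hkv)).2
    rw [hvs, List.count_filter hb]
  rw [List.map_congr_left h1]
  refine List.Perm.map _ ?_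
  rw [List.perm_ext_iff_of_nodup (hK ▸ PySem.Set.nodup_ofList vs)
    (List.Nodup.filter _ (by decide))]
  intro a
  simp only [hK, PySem.Set.mem_ofList, hvs, List.mem_filter, List.count_pos_iff,
    List.contains_iff_mem, decide_eq_true_eq]
  tauto

-- ===== VERDICT (by name: the statement is the Claim_ definition above) =====
theorem non_dice_verita_spec : Claim_equal_non_dice_verita := by
  intro input _
  show non_dice_verita input = non_dice_verita_alt input
  rw [non_dice_verita_eq_dup, alt_eq_dup]
  simp only [decide_eq_decide]
  exact not_congr ((vals_perm input).nodup_iff)
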